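-- pv_equiv track=rewrite | github.com/RC4ML/Bi-KV | Bi-KV/init.py | get_process_info
-- ===== SOURCE A (Python) =====
-- PROCESS_TYPES = [
--     ('scheduler', 1),
--     ('coordinator', 1),
--     ('inferworker', 4),
--     ('kvcache', 4),
-- ]
--
-- def get_process_info(rank, process_types=PROCESS_TYPES):
--     """
--     根据全局 rank 返回进程类型和该类型下的索引。
--
--     Args:
--         rank (int): 全局 rank。
--         process_types (list): 进程类型及其数量的有序列表。
--
--     Returns:
--         tuple: (process_type, type_index)
--     """
--     current_rank = 0
--     for process_type, count in process_types:
--         if current_rank + count > rank: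
--             type_index = rank - current_rank
--             return process_type, type_index
--         current_rank += count
--     raise ValueError(f"Rank {rank} 超出定义的进程类型范围。")
-- ===== SOURCE B (Python) =====
-- PROCESS_TYPES = [
--     ('scheduler', 1),
--     ('coordinator', 1),
--     ('inferworker', 4),
--     ('kvcache', 4),
-- ]
--
-- def get_process_info(rank, process_types=PROCESS_TYPES):
--     """Staged version: first build the table of cumulative prefix sums of the
--     counts, then search that table for the first bucket whose cumulative
--     count exceeds rank."""
--     prefixes = []
--     total = 0
--     for _, count in process_types:
--         total += count
--         prefixes.append(total)
--     for p, (name, count) in zip(prefixes, process_types):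
--         if rank < p:
--             return name, rank - (p - count)
--     raise ValueError(f"Rank {rank} 超出定义的进程类型范围。")
-- ===== Notes on version B (the rewrite author's own statement) =====
-- stated objective: alternative
-- what changed: Replaces A's fused accumulate-and-test scan by two staged passes: building a cumulative prefix-sum table of the counts, then searching that table (zipped with the types) for the first prefix exceeding rank.
import Mathlib
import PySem

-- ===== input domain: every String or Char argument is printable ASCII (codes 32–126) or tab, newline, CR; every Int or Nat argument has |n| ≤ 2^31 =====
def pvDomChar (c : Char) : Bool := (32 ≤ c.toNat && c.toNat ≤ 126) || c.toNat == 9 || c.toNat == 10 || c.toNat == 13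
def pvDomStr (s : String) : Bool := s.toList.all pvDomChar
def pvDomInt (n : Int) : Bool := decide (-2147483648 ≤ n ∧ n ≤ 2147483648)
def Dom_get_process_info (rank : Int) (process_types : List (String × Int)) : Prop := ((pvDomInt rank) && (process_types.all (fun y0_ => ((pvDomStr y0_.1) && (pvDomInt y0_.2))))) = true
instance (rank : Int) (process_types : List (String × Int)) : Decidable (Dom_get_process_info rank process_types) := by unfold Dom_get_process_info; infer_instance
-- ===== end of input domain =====

-- B replaces A's fused accumulate-and-test scan by two staged passes:
-- build a prefix-sum table of the counts, then search it (objective: alternative).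

-- ===== PORT A =====
-- A's single loop with accumulator current_rank; the final `raise` case is
-- outside Pre_ and its arm returns ("", 0).
def pvGoA (rank : Int) (current : Int) : List (String × Int) → String × Int
  | [] => ("", 0)
  | (t, c) :: rest =>
    if current + c > rank then (t, rank - current)
    else pvGoA rank (current + c) rest

def get_process_info (rank : Int) (process_types : List (String × Int)) : String × Int :=
  pvGoA rank 0 process_types

-- ===== PORT B =====
-- Pass 1 of Source B: the running-total loop appending to `prefixes`.
def pvPrefixes (process_types : List (String × Int)) : List Int :=
  (process_types.foldl
    (fun (st : Int × List Int) tc => (st.1 + tc.2, st.2 ++ [st.1 + tc.2]))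
    (0, [])).2

-- Pass 2 of Source B: the search over zip(prefixes, process_types); the raising
-- arm is outside Pre_ and returns ("", 0).
def pvLookup (rank : Int) : List (Int × (String × Int)) → String × Int
  | [] => ("", 0)
  | (p, (name, count)) :: rest =>
    if rank < p then (name, rank - (p - count)) else pvLookup rank rest

def get_process_info_alt (rank : Int) (process_types : List (String × Int)) : String × Int :=
  pvLookup rank ((pvPrefixes process_types).zip process_types)

-- ===== PRECONDITION & SPEC =====
-- Pre_ excludes exactly the inputs on which A raises ValueError: those where no
-- prefix of the counts ever exceeds rank.
def Pre_get_process_info (rank : Int) (process_types : List (String × Int)) : Prop :=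
  ∃ i ∈ List.range process_types.length,
    rank < (((process_types.take (i + 1)).map Prod.snd).sum)
instance (rank : Int) (process_types : List (String × Int)) : Decidable (Pre_get_process_info rank process_types) := by unfold Pre_get_process_info; infer_instance

def pvWitness_get_process_info : Int × (List (String × Int)) := (2, [("scheduler", 1), ("worker", 4)])

def Spec_get_process_info (rank : Int) (process_types : List (String × Int)) (out : String × Int) : Prop := out = get_process_info_alt rank process_types
instance (rank : Int) (process_types : List (String × Int)) (out : String × Int) : Decidable (Spec_get_process_info rank process_types out) := by unfold Spec_get_process_info; infer_instance

-- ===== CLAIM (what is proved, stated in full; the proofs are below) =====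
def Claim_equal_get_process_info : Prop := ∀ (rank : Int) (process_types : List (String × Int)), Dom_get_process_info rank process_types → Pre_get_process_info rank process_types → Spec_get_process_info rank process_types (get_process_info rank process_types)

-- ===== LEMMAS AND PROOFS =====
-- Proof-only scan characterising B's prefix table started from total t.
def pvScan (t : Int) : List (String × Int) → List Int
  | [] => []
  | tc :: rest => (t + tc.2) :: pvScan (t + tc.2) rest

theorem pvPrefixes_fold_eq (l : List (String × Int)) :
    ∀ (t : Int) (acc : List Int),
      (l.foldl (fun (st : Int × List Int) tc => (st.1 + tc.2, st.2 ++ [st.1 + tc.2]))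
        (t, acc)) = (t + (l.map Prod.snd).sum, acc ++ pvScan t l) := by
  induction l with
  | nil => intro t acc; simp [pvScan]
  | cons hd tl ih =>
    intro t acc
    simp only [List.foldl, pvScan, List.map, List.sum_cons]
    rw [ih]
    refine Prod.ext ?_ ?_
    · simp; ring
    · simp

theorem pvPrefixes_eq (l : List (String × Int)) : pvPrefixes l = pvScan 0 l := by
  unfold pvPrefixes
  rw [pvPrefixes_fold_eq]
  simp

-- The two helpers agree unconditionally when B's table starts at A's current total.
theorem pvGoA_eq_pvLookup (rank : Int) :
    ∀ (l : List (String × Int)) (t : Int),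
      pvGoA rank t l = pvLookup rank ((pvScan t l).zip l) := by
  intro l
  induction l with
  | nil => intro t; rfl
  | cons hd tl ih =>
    intro t
    obtain ⟨name, count⟩ := hd
    simp only [pvGoA, pvScan, List.zip_cons_cons, pvLookup]
    by_cases h : t + count > rank
    · rw [if_pos h, if_pos (by omega)]
      refine Prod.ext rfl ?_
      simp
    · rw [if_neg h, if_neg (by omega), ih (t + count)]

-- ===== VERDICT (by name: the statement is the Claim_ definition above) =====
theorem get_process_info_spec : Claim_equal_get_process_info := by
  intro rank process_types _ _
  unfold Spec_get_process_info get_process_info get_process_info_alt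
  rw [pvPrefixes_eq]
  exact pvGoA_eq_pvLookup rank process_types 0
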